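-- pv_equiv track=rewrite | github.com/FeChiste/Crud | pythonn/Exercicios repetição.py | verificar_numero_primo_fermat
-- ===== SOURCE A (Python) =====
-- def verificar_numero_primo_fermat(num):
--     if num < 2:
--         return False
--     exp = 0
--     fermat = 2 ** (2 ** exp) + 1
--     while fermat < num:
--         exp += 1
--         fermat = 2 ** (2 ** exp) + 1
--     if fermat == num:
--         return True
--     return False
-- ===== SOURCE B (Python) =====
-- def verificar_numero_primo_fermat(num):
--     if num < 2:
--         return False
--     x = num - 1
--     if x & (x - 1) != 0:
--         return False  # num - 1 is not a power of two
--     m = x.bit_length() - 1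
--     return m >= 1 and m & (m - 1) == 0  # exponent itself a power of two
-- ===== Notes on version B (the rewrite author's own statement) =====
-- stated objective: alternative
-- what changed: Instead of generating Fermat numbers 2^(2^k)+1 in a loop until one reaches num, B tests arithmetically that num-1 is a power of two (x & (x-1) == 0) and that its exponent (bit_length-1) is itself a power of two >= 1.
import Mathlib
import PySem

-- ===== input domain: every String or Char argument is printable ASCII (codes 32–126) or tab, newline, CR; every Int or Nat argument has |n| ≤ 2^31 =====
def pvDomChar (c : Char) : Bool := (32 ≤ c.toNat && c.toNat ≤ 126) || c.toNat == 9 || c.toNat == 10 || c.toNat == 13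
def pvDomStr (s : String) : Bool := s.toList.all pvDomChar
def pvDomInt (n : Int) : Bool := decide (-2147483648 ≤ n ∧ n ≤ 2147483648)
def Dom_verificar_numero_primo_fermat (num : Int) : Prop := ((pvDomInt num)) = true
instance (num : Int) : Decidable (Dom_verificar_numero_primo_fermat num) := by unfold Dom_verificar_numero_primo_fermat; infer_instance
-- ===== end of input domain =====

-- B replaces A's Fermat-number generating loop by a bit-arithmetic test (num-1 a power of two whose exponent is a power of two); alternative algorithm, return value proved equal on the whole domain.


-- ===== PORT A =====
-- A's while loop: exp/fermat advance until fermat ≥ num; returns the first fermat ≥ num.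
def fermatLoop (num : Int) (exp : Nat) : Int :=
  if 2 ^ 2 ^ exp + 1 < num then fermatLoop num (exp + 1) else 2 ^ 2 ^ exp + 1
  termination_by (num - (2 ^ 2 ^ exp + 1)).toNat
  decreasing_by
    have h1 : (2:Nat) ^ exp < 2 ^ (exp + 1) := Nat.pow_lt_pow_right (by norm_num) (by omega)
    have h2 : (2:Int) ^ (2 ^ exp) < 2 ^ (2 ^ (exp + 1)) :=
      pow_lt_pow_right₀ (by norm_num : (1:Int) < 2) h1
    omega

def verificar_numero_primo_fermat (num : Int) : Bool :=
  if num < 2 then false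
  else if fermatLoop num 0 == num then true else false

-- ===== PORT B =====
-- x.bit_length() - 1 for x ≥ 1 is exactly Nat.log2 x; '&' on the nonnegative ints here is Nat.land.
def verificar_numero_primo_fermat_alt (num : Int) : Bool :=
  if num < 2 then false
  else
    let x := (num - 1).toNat
    if x &&& (x - 1) != 0 then false
    else
      let m := Nat.log2 x
      decide (1 ≤ m) && (m &&& (m - 1) == 0)

-- ===== PRECONDITION & SPEC =====
def Spec_verificar_numero_primo_fermat (num : Int) (out : Bool) : Prop := out = verificar_numero_primo_fermat_alt num
instance (num : Int) (out : Bool) : Decidable (Spec_verificar_numero_primo_fermat num out) := by unfold Spec_verificar_numero_primo_fermat; infer_instance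

-- ===== CLAIM (what is proved, stated in full; the proofs are below) =====
def Claim_equal_verificar_numero_primo_fermat : Prop := ∀ (num : Int), Dom_verificar_numero_primo_fermat num → Spec_verificar_numero_primo_fermat num (verificar_numero_primo_fermat num)

-- ===== LEMMAS AND PROOFS =====

-- A power of two and its predecessor share no bits; conversely a number sharing no bits
-- with its predecessor is the power of two 2 ^ Nat.log2 n.
theorem pow2_of_land_pred_eq_zero : ∀ n : Nat, 1 ≤ n → n &&& (n - 1) = 0 → n = 2 ^ Nat.log2 n := by
  intro n
  induction n using Nat.strong_induction_on with
  | _ n ih =>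
    intro h1 h0
    rcases Nat.even_or_odd n with he | ho
    · obtain ⟨a, ha⟩ := he
      have ha2 : n = 2 * a := by omega
      have ha1 : 1 ≤ a := by omega
      have hdiv : n / 2 = a := by omega
      have hdiv' : (n - 1) / 2 = a - 1 := by omega
      have hland : a &&& (a - 1) = 0 := by
        apply Nat.eq_of_testBit_eq
        intro i
        have h' : (n &&& (n - 1)).testBit (i + 1) = false := by
          rw [h0]; exact Nat.zero_testBit _
        rw [Nat.testBit_land, Nat.testBit_add_one, Nat.testBit_add_one, hdiv, hdiv'] at h'
        rw [Nat.testBit_land, Nat.zero_testBit]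
        exact h'
      have hpow := ih a (by omega) ha1 hland
      have hlog : Nat.log2 n = Nat.log2 a + 1 := by
        rw [Nat.log2_def, if_pos (by omega : 2 ≤ n), hdiv]
      rw [hlog, pow_succ]
      omega
    · obtain ⟨a, ha⟩ := ho
      by_cases ha0 : a = 0
      · subst ha0
        have : n = 1 := by omega
        subst this
        decide
      · exfalso
        have hdiv : n / 2 = a := by omega
        have hdiv' : (n - 1) / 2 = a := by omega
        have hbit : ∃ i, a.testBit i = true := by
          by_contra hc
          push_neg at hc
          exact ha0 (Nat.eq_of_testBit_eq (fun i => by simp [Bool.eq_false_iff.mpr (hc i)]))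
        obtain ⟨i, hi⟩ := hbit
        have h' : (n &&& (n - 1)).testBit (i + 1) = false := by
          rw [h0]; exact Nat.zero_testBit _
        rw [Nat.testBit_land, Nat.testBit_add_one, Nat.testBit_add_one, hdiv, hdiv', hi] at h'
        simp at h'

theorem loop_char (num : Int) (h2 : 2 ≤ num) (hub : num ≤ 2147483648) :
    fermatLoop num 0 =
      if num ≤ 3 then 3 else if num ≤ 5 then 5 else if num ≤ 17 then 17
      else if num ≤ 257 then 257 else if num ≤ 65537 then 65537 else 4294967297 := by
  by_cases h3 : num ≤ 3
  · rw [fermatLoop, if_neg (by norm_num; omega), if_pos h3]; norm_num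
  · rw [fermatLoop, if_pos (by norm_num; omega), if_neg h3]
    by_cases h5 : num ≤ 5
    · rw [fermatLoop, if_neg (by norm_num; omega), if_pos h5]; norm_num
    · rw [fermatLoop, if_pos (by norm_num; omega), if_neg h5]
      by_cases h17 : num ≤ 17
      · rw [fermatLoop, if_neg (by norm_num; omega), if_pos h17]; norm_num
      · rw [fermatLoop, if_pos (by norm_num; omega), if_neg h17]
        by_cases h257 : num ≤ 257
        · rw [fermatLoop, if_neg (by norm_num; omega), if_pos h257]; norm_num
        · rw [fermatLoop, if_pos (by norm_num; omega), if_neg h257]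
          by_cases h65537 : num ≤ 65537
          · rw [fermatLoop, if_neg (by norm_num; omega), if_pos h65537]; norm_num
          · rw [fermatLoop, if_pos (by norm_num; omega), if_neg h65537]
            rw [fermatLoop, if_neg (by norm_num; omega)]; norm_num

theorem A_iff (num : Int) (h2 : 2 ≤ num) (hub : num ≤ 2147483648) :
    verificar_numero_primo_fermat num = true ↔
      (num = 3 ∨ num = 5 ∨ num = 17 ∨ num = 257 ∨ num = 65537) := by
  unfold verificar_numero_primo_fermat
  rw [if_neg (by omega), loop_char num h2 hub]
  split_ifs <;> simp_all <;> omega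

theorem B_iff (num : Int) (h2 : 2 ≤ num) (hub : num ≤ 2147483648) :
    verificar_numero_primo_fermat_alt num = true ↔
      (num = 3 ∨ num = 5 ∨ num = 17 ∨ num = 257 ∨ num = 65537) := by
  have hform : verificar_numero_primo_fermat_alt num =
      (if ((num - 1).toNat &&& ((num - 1).toNat - 1)) != 0 then false
       else (decide (1 ≤ Nat.log2 (num - 1).toNat) &&
             (Nat.log2 (num - 1).toNat &&& (Nat.log2 (num - 1).toNat - 1) == 0))) := by
    unfold verificar_numero_primo_fermat_alt
    rw [if_neg (by omega)]
  rw [hform]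
  constructor
  · intro h
    split at h
    · exact absurd h (by simp)
    · rename_i hland
      simp only [bne_iff_ne, ne_eq, not_not] at hland
      simp only [Bool.and_eq_true, decide_eq_true_eq, beq_iff_eq] at h
      obtain ⟨hm1, hmland⟩ := h
      have hx1 : 1 ≤ (num - 1).toNat := by omega
      have hxpow := pow2_of_land_pred_eq_zero _ hx1 hland
      have hmpow := pow2_of_land_pred_eq_zero _ hm1 hmland
      have hmub : Nat.log2 (num - 1).toNat < 31 :=
        (Nat.log2_lt (by omega)).mpr (by norm_num; omega)
      have hl5 : Nat.log2 (Nat.log2 (num - 1).toNat) < 5 :=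
        (Nat.log2_lt (by omega)).mpr (by omega)
      set m := Nat.log2 (num - 1).toNat with hm
      set l := Nat.log2 m with hl
      clear_value m l
      clear hm hl
      interval_cases l <;> norm_num at hmpow <;> subst hmpow <;> norm_num at hxpow <;> omega
  · intro h
    rcases h with rfl | rfl | rfl | rfl | rfl <;> decide

-- ===== VERDICT (by name: the statement is the Claim_ definition above) =====
theorem verificar_numero_primo_fermat_spec : Claim_equal_verificar_numero_primo_fermat := by
  intro num hdom
  have hb : -2147483648 ≤ num ∧ num ≤ 2147483648 := by
    simpa [Dom_verificar_numero_primo_fermat, pvDomInt] using hdom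
  unfold Spec_verificar_numero_primo_fermat
  by_cases hlt : num < 2
  · unfold verificar_numero_primo_fermat verificar_numero_primo_fermat_alt
    rw [if_pos hlt, if_pos hlt]
  · rw [Bool.eq_iff_iff, A_iff num (by omega) hb.2, B_iff num (by omega) hb.2]
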